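-- pv_equiv track=rewrite | github.com/ardent-data/weevr | src/weevr/engine/runner.py | _get_transitive_dependents
-- ===== SOURCE A (Python) =====
-- def _get_transitive_dependents(thread_name: str, dependents: dict[str, list[str]]) -> set[str]:
--     """Return all transitive downstream threads of ``thread_name``."""
--     visited: set[str] = set()
--     queue = list(dependents.get(thread_name, []))
--     while queue:
--         current = queue.pop()
--         if current not in visited:
--             visited.add(current)
--             queue.extend(dependents.get(current, []))
--     return visited
-- ===== SOURCE B (Python) =====
-- def _get_transitive_dependents(thread_name: str, dependents: dict[str, list[str]]) -> set[str]:
--     """Return all transitive downstream threads of ``thread_name``.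
--
--     Recursive depth-first search instead of A's explicit worklist loop.
--     (Children are taken in reversed order; irrelevant for the returned set,
--     it just makes the traversal order coincide with A's stack order.)
--     """
--     visited: set[str] = set()
--
--     def dfs(node: str) -> None:
--         if node in visited:
--             return
--         visited.add(node)
--         for child in reversed(dependents.get(node, [])):
--             dfs(child)
--
--     for dep in reversed(dependents.get(thread_name, [])):
--         dfs(dep)
--     return visited
-- ===== Notes on version B (the rewrite author's own statement) =====
-- stated objective: alternative
-- what changed: A's iterative worklist loop (pop from a mutable queue, late visited check, extend with children) is replaced by a recursive depth-first search with an inner dfs helper that checks visited on entry and recurses into each child.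
import Mathlib
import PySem

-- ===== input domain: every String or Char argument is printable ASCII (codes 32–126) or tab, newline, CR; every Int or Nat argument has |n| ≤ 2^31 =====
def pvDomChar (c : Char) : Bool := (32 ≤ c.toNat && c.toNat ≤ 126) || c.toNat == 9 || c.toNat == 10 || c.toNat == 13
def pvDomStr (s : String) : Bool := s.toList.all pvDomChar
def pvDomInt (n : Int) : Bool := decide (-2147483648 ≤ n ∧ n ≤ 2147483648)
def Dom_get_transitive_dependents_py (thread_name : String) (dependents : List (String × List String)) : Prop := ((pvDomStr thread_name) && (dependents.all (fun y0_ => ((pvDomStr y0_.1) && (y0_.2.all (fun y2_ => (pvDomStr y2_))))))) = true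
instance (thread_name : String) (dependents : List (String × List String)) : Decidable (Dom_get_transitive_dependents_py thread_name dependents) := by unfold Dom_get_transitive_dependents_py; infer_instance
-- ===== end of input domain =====

-- B replaces A's iterative worklist loop by a recursive depth-first search (different decomposition, same cost); proved to return the identical list.


-- `dependents.get(k, [])` on the association list (first match = the dict's binding)
def pvGet (dependents : List (String × List String)) (k : String) : List String :=
  ((dependents.find? (fun p => p.1 == k)).map (·.2)).getD []

-- universe of names occurring in the dict (keys and value elements): only used for termination
def pvUniv (dependents : List (String × List String)) : Finset String :=
  (dependents.flatMap (fun p => p.1 :: p.2)).toFinset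

-- total size of all value lists: only used for termination
def pvSz (dependents : List (String × List String)) : Nat :=
  (dependents.map (fun p => p.2.length)).sum

-- names of the universe not yet visited: the termination potential
def pvPhi (dependents : List (String × List String)) (visited : List String) : Nat :=
  ((pvUniv dependents).filter (fun x => x ∉ visited)).card

theorem pvGet_len_le (dependents : List (String × List String)) (k : String) :
    (pvGet dependents k).length ≤ pvSz dependents := by
  induction dependents with
  | nil => simp [pvGet, pvSz]
  | cons p rest ih =>
    by_cases h : p.1 == k
    · simp [pvGet, pvSz, List.find?, h]
    · simp only [pvGet, pvSz, List.find?, h, List.map_cons, List.sum_cons] at *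
      omega

theorem pvGet_not_mem_univ (dependents : List (String × List String)) (k : String)
    (h : k ∉ pvUniv dependents) : pvGet dependents k = [] := by
  induction dependents with
  | nil => rfl
  | cons p rest ih =>
    simp only [pvUniv, List.flatMap_cons, List.toFinset_append, Finset.mem_union,
      List.mem_toFinset, List.mem_cons, not_or] at h
    have hk : ¬ (p.1 == k) = true := by
      simp only [beq_iff_eq]; exact fun e => h.1.1 (e ▸ rfl)
    simp only [pvGet, List.find?, hk] at *
    exact ih (by simp [pvUniv, h.2])

theorem pvPhi_mono (dependents : List (String × List String)) {v w : List String}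
    (h : ∀ x ∈ v, x ∈ w) : pvPhi dependents w ≤ pvPhi dependents v := by
  apply Finset.card_le_card
  intro x hx
  simp only [Finset.mem_filter] at *
  exact ⟨hx.1, fun hv => hx.2 (h x hv)⟩

theorem pvPhi_add_lt (dependents : List (String × List String)) {v : List String} {x : String}
    (hU : x ∈ pvUniv dependents) (hv : x ∉ v) :
    pvPhi dependents (v ++ [x]) < pvPhi dependents v := by
  apply Finset.card_lt_card
  constructor
  · intro y hy
    simp only [Finset.mem_filter, List.mem_append, List.mem_singleton, not_or] at *
    exact ⟨hy.1, hy.2.1⟩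
  · intro hsub
    have hx : x ∈ (pvUniv dependents).filter (fun y => y ∉ v) := by
      simp [Finset.mem_filter, hU, hv]
    have := hsub hx
    simp [Finset.mem_filter] at this
  
theorem pvPhi_add_not_univ (dependents : List (String × List String)) {v : List String} {x : String}
    (hU : x ∉ pvUniv dependents) : pvPhi dependents (v ++ [x]) = pvPhi dependents v := by
  unfold pvPhi
  congr 1
  apply Finset.filter_congr
  intro y hy
  have : y ≠ x := fun e => hU (e ▸ hy)
  simp [List.mem_append, this]

-- ===== PORT A =====
-- A's while-loop: pop the LAST element of the queue (queue.pop()), visit it if new,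
-- extend the queue with its children. `visited` is the Python set in insertion order.
def pvLoopA (dependents : List (String × List String)) (queue visited : List String) : List String :=
  if h : queue = [] then visited
  else
    let current := queue.getLast h
    if current ∈ visited then pvLoopA dependents queue.dropLast visited
    else pvLoopA dependents (queue.dropLast ++ pvGet dependents current)
           (PySem.Set.add visited current)
termination_by pvPhi dependents visited * (pvSz dependents + 1) + queue.length
decreasing_by
  · have : 0 < queue.length := List.length_pos_iff.mpr h
    simp
    omega
  · rename_i hmem
    have hlen : queue.dropLast.length + 1 = queue.length := by
      have : 0 < queue.length := List.length_pos_iff.mpr h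
      simp; omega
    have hch := pvGet_len_le dependents (queue.getLast h)
    have hadd : PySem.Set.add visited (queue.getLast h) = visited ++ [queue.getLast h] := by
      simp only [PySem.Set.add, PySem.Set.contains]
      rw [if_neg]
      simpa using hmem
    rw [hadd]
    by_cases hU : queue.getLast h ∈ pvUniv dependents
    · have h1 := pvPhi_add_lt dependents hU hmem
      have key : pvPhi dependents (visited ++ [queue.getLast h]) * (pvSz dependents + 1)
          + (pvSz dependents + 1) ≤ pvPhi dependents visited * (pvSz dependents + 1) := by
        calc pvPhi dependents (visited ++ [queue.getLast h]) * (pvSz dependents + 1)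
              + (pvSz dependents + 1)
            = (pvPhi dependents (visited ++ [queue.getLast h]) + 1) * (pvSz dependents + 1) := by
              ring
          _ ≤ pvPhi dependents visited * (pvSz dependents + 1) :=
              Nat.mul_le_mul_right _ h1
      rw [List.length_append]
      linarith
    · rw [pvPhi_add_not_univ dependents hU, pvGet_not_mem_univ dependents _ hU]
      simp only [List.append_nil]
      omega

def get_transitive_dependents_py (thread_name : String) (dependents : List (String × List String)) : List String :=
  pvLoopA dependents (pvGet dependents thread_name) PySem.Set.empty

-- ===== PORT B =====
-- B's recursive dfs, transcribed over the list of nodes still to be entered at the current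
-- level: dfs(n) checks `visited` on entry, adds n, then recurses into reversed(children(n));
-- afterwards the remaining nodes of the level are processed. The subtype carries the
-- invariant "visited only grows", needed by the termination measure.
def pvDfsB (dependents : List (String × List String)) :
    (nodes : List String) → (visited : List String) → {r : List String // ∀ x ∈ visited, x ∈ r}
  | [], visited => ⟨visited, fun _ hx => hx⟩
  | n :: rest, visited =>
    if hn : n ∈ visited then pvDfsB dependents rest visited
    else
      let inner := pvDfsB dependents (pvGet dependents n).reverse (PySem.Set.add visited n)
      let outer := pvDfsB dependents rest inner.val
      ⟨outer.val, fun x hx => outer.property x (inner.property x (by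
        simp only [PySem.Set.add, PySem.Set.contains]
        split <;> simp [hx]))⟩
termination_by nodes visited => (pvPhi dependents visited, nodes.length)
decreasing_by
  · exact Prod.Lex.right _ (by simp)
  · have hadd : PySem.Set.add visited n = visited ++ [n] := by
      simp only [PySem.Set.add, PySem.Set.contains]
      rw [if_neg]; simpa using hn
    by_cases hU : n ∈ pvUniv dependents
    · exact Prod.Lex.left _ _ (by rw [hadd]; exact pvPhi_add_lt dependents hU hn)
    · have h1 : pvPhi dependents (PySem.Set.add visited n) = pvPhi dependents visited := by
        rw [hadd]; exact pvPhi_add_not_univ dependents hU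
      rw [h1, pvGet_not_mem_univ dependents _ hU]
      exact Prod.Lex.right _ (by simp)
  · have hle : pvPhi dependents inner.val ≤ pvPhi dependents visited := by
      apply pvPhi_mono
      intro x hx
      exact inner.property x (by
        simp only [PySem.Set.add, PySem.Set.contains]
        split <;> simp [hx])
    rcases lt_or_eq_of_le hle with hlt | heq
    · exact Prod.Lex.left _ _ hlt
    · rw [heq]; exact Prod.Lex.right _ (by simp)

def get_transitive_dependents_py_alt (thread_name : String) (dependents : List (String × List String)) : List String :=
  (pvDfsB dependents (pvGet dependents thread_name).reverse PySem.Set.empty).val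

-- ===== PRECONDITION & SPEC =====
def Spec_get_transitive_dependents_py (thread_name : String) (dependents : List (String × List String)) (out : List String) : Prop := out = get_transitive_dependents_py_alt thread_name dependents
instance (thread_name : String) (dependents : List (String × List String)) (out : List String) : Decidable (Spec_get_transitive_dependents_py thread_name dependents out) := by unfold Spec_get_transitive_dependents_py; infer_instance

-- ===== CLAIM (what is proved, stated in full; the proofs are below) =====
def Claim_equal_get_transitive_dependents_py : Prop := ∀ (thread_name : String) (dependents : List (String × List String)), Dom_get_transitive_dependents_py thread_name dependents → Spec_get_transitive_dependents_py thread_name dependents (get_transitive_dependents_py thread_name dependents)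

-- ===== LEMMAS AND PROOFS =====

-- running B's dfs over a concatenation = running it over the two parts in sequence
theorem pvDfsB_append (dependents : List (String × List String)) (a b v : List String) :
    (pvDfsB dependents (a ++ b) v).val = (pvDfsB dependents b (pvDfsB dependents a v).val).val := by
  induction a generalizing v with
  | nil =>
    have h : (pvDfsB dependents [] v).val = v := by simp [pvDfsB]
    simp only [List.nil_append]
    rw [h]
  | cons n a ih =>
    by_cases hn : n ∈ v
    · have e1 : ∀ l, pvDfsB dependents (n :: l) v = pvDfsB dependents l v := by
        intro l; rw [pvDfsB.eq_def]; simp [hn]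
      rw [List.cons_append, e1, e1]
      exact ih v
    · have e1 : ∀ l, (pvDfsB dependents (n :: l) v).val
          = (pvDfsB dependents l
              (pvDfsB dependents (pvGet dependents n).reverse (PySem.Set.add v n)).val).val := by
        intro l; rw [pvDfsB.eq_def]; simp [hn]
      rw [List.cons_append, e1, e1]
      exact ih _

-- A's stack loop on `queue` is B's recursive descent on `queue.reverse`
theorem pvLoopA_eq_dfsB (dependents : List (String × List String)) (queue visited : List String) :
    pvLoopA dependents queue visited = (pvDfsB dependents queue.reverse visited).val := by
  induction queue, visited using pvLoopA.induct dependents with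
  | case1 visited => simp [pvLoopA, pvDfsB]
  | case2 queue visited h current hmem ih =>
    rw [pvLoopA, dif_neg h, if_pos hmem, ih]
    have hq : queue.reverse = current :: queue.dropLast.reverse := by
      conv_lhs => rw [← List.dropLast_concat_getLast h]
      simp [current]
    rw [hq, pvDfsB, dif_pos hmem]
  | case3 queue visited h current hmem ih =>
    rw [pvLoopA, dif_neg h, if_neg hmem, ih]
    have hq : queue.reverse = current :: queue.dropLast.reverse := by
      conv_lhs => rw [← List.dropLast_concat_getLast h]
      simp [current]
    rw [hq, pvDfsB, dif_neg hmem, List.reverse_append, pvDfsB_append]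

-- ===== VERDICT (by name: the statement is the Claim_ definition above) =====
theorem get_transitive_dependents_py_spec : Claim_equal_get_transitive_dependents_py := by
  intro thread_name dependents _
  show _ = _
  unfold get_transitive_dependents_py get_transitive_dependents_py_alt
  exact pvLoopA_eq_dfsB dependents (pvGet dependents thread_name) PySem.Set.empty
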